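-- pv_equiv track=rewrite | github.com/julia0926/TIL_Algo | Programmers_lv2/142085_디펜스게임.py | solution
-- ===== SOURCE A (Python) =====
-- def solution(n, k, enemy):
--     if len(enemy) == k:
--         return k
--     enemy.sort(reverse=True)
--     for i in range(k, len(enemy)):
--         if n < enemy[i]:
--             return i
--         n -= enemy[i]
-- ===== SOURCE B (Python) =====
-- def solution(n, k, enemy):
--     if len(enemy) == k:
--         return k
--     enemy.sort(reverse=True)
--     sums = []
--     total = 0
--     for x in enemy[k:]:
--         total += x
--         sums.append(total)
--     for j, s in enumerate(sums):
--         if s > n: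
--             return k + j
--     return None
-- ===== Notes on version B (the rewrite author's own statement) =====
-- stated objective: alternative
-- what changed: Replaces A's subtract-and-early-return scan by building the prefix-sum table of the sorted suffix enemy[k:] and returning k plus the first offset whose cumulative sum exceeds n; Pre_ excludes negative k, which is outside the game's natural domain (k is a count of invincibility skips) and on which A either raises IndexError or accidentally re-visits the whole list via negative-index wraparound.
-- outside the precondition, e.g. on solution(3, -1, [1, 2, 3]): A returns 0, B returns None; on solution(5, -4, [1, 2, 3]): A raises IndexError, B returns -2
import Mathlib
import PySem

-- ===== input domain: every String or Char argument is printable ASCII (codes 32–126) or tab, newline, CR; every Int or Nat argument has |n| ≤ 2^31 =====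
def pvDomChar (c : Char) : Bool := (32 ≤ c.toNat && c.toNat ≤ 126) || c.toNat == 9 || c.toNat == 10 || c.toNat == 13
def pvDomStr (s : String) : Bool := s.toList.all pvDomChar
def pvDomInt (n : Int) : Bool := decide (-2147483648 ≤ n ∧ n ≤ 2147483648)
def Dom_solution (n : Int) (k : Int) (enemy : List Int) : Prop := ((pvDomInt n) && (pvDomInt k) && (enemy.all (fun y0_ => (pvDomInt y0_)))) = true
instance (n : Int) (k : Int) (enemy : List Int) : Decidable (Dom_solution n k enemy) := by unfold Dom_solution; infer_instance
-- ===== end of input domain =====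

-- B builds the prefix-sum table of the sorted suffix enemy[k:] and returns k + the first
-- offset whose cumulative sum exceeds n, instead of A's subtract-and-early-return scan;
-- return-value equivalence only (both mutate `enemy` in place by sorting it, identically).

-- ===== PORT A =====
-- the 'for i in range(k, len(enemy))' loop: state n, early return i, fall-through None
def solutionLoopA (e : List Int) : List Int → Int → Option Int
  | [], _ => none
  | i :: rest, n =>
    match PySem.List.pyGet? e i with
    | none => none     -- IndexError in Python; excluded by Pre_solution
    | some v => if n < v then some i else solutionLoopA e rest (n - v)

def solution (n : Int) (k : Int) (enemy : List Int) : Option Int :=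
  if (enemy.length : Int) = k then some k
  else
    let e := PySem.List.sorted enemy (fun x => x) true
    solutionLoopA e (PySem.List.pyRange k (e.length : Int) 1) n

-- ===== PORT B =====
-- the 'for j, s in enumerate(sums)' loop: return k + j at the first cumulative sum > n
def solutionScanB (k n : Int) : List Int → Int → Option Int
  | [], _ => none
  | s :: rest, j => if s > n then some (k + j) else solutionScanB k n rest (j + 1)

def solution_alt (n : Int) (k : Int) (enemy : List Int) : Option Int :=
  if (enemy.length : Int) = k then some k
  else
    let e := PySem.List.sorted enemy (fun x => x) true
    -- 'for x in enemy[k:]: total += x; sums.append(total)'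
    let sums := ((PySem.List.slice e (some k) none).foldl
      (fun (p : List Int × Int) x => (p.1 ++ [p.2 + x], p.2 + x)) ([], 0)).1
    solutionScanB k n sums 0

-- ===== PRECONDITION & SPEC =====
-- Pre_ excludes negative k, outside the game's natural domain (k counts invincibility
-- skips): there A raises IndexError (k < -len) or accidentally re-visits the whole list
-- via negative-index wraparound (-len ≤ k < 0); B scans only the suffix enemy[k:].
def Pre_solution (n : Int) (k : Int) (enemy : List Int) : Prop := 0 ≤ k
instance (n : Int) (k : Int) (enemy : List Int) : Decidable (Pre_solution n k enemy) := by unfold Pre_solution; infer_instance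

def pvWitness_solution : Int × Int × List Int := (7, 1, [4, 2, 4, 8])

def Spec_solution (n : Int) (k : Int) (enemy : List Int) (out : Option Int) : Prop := out = solution_alt n k enemy
instance (n : Int) (k : Int) (enemy : List Int) (out : Option Int) : Decidable (Spec_solution n k enemy out) := by unfold Spec_solution; infer_instance

-- ===== CLAIM (what is proved, stated in full; the proofs are below) =====
def Claim_equal_solution : Prop := ∀ (n : Int) (k : Int) (enemy : List Int), Dom_solution n k enemy → Pre_solution n k enemy → Spec_solution n k enemy (solution n k enemy)

-- ===== LEMMAS AND PROOFS =====

-- proof-side model of A's scan on the list of visited values, carrying the absolute index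
def subLoop : Int → Int → List Int → Option Int
  | _, _, [] => none
  | n, j, v :: rest => if n < v then some j else subLoop (n - v) (j + 1) rest

-- proof-side prefix sums starting from accumulator s
def psums : List Int → Int → List Int
  | [], _ => []
  | x :: r, s => (s + x) :: psums r (s + x)

lemma foldl_psums (t : List Int) (acc : List Int) (s : Int) :
    (t.foldl (fun (p : List Int × Int) x => (p.1 ++ [p.2 + x], p.2 + x)) (acc, s)).1
      = acc ++ psums t s := by
  induction t generalizing acc s with
  | nil => simp [psums]
  | cons x r ih => simp [List.foldl, psums, ih]

lemma scanB_eq_subLoop (k n : Int) (t : List Int) (s : Int) (j : Int) :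
    solutionScanB k n (psums t s) j = subLoop (n - s) (k + j) t := by
  induction t generalizing s j with
  | nil => simp [psums, solutionScanB, subLoop]
  | cons v r ih =>
    simp only [psums, solutionScanB, subLoop]
    by_cases h : n - s < v
    · rw [if_pos (by omega), if_pos h]
    · rw [if_neg (by omega), if_neg h, ih]
      congr 1 <;> omega

lemma drop_step (e : List Int) (i : Int) (h0 : 0 ≤ i) (h1 : i < (e.length : Int)) :
    ∃ v, PySem.List.pyGet? e i = some v ∧
      e.drop i.toNat = v :: e.drop (i + 1).toNat := by
  have hm : i.toNat < e.length := by omega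
  refine ⟨e[i.toNat], PySem.List.pyGet?_eq_some_getElem e h0 (by omega), ?_⟩
  have : (i + 1).toNat = i.toNat + 1 := by omega
  rw [this, List.drop_eq_getElem_cons hm]

lemma loopA_eq_subLoop (e : List Int) (i n : Int) (h0 : 0 ≤ i) :
    solutionLoopA e (PySem.List.pyRange i (e.length : Int) 1) n
      = subLoop n i (e.drop i.toNat) := by
  by_cases hlt : i < (e.length : Int)
  · generalize hf : ((e.length : Int) - i).toNat = f
    induction f generalizing i n with
    | zero => omega
    | succ f ih =>
      obtain ⟨v, hget, htail⟩ := drop_step e i h0 hlt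
      rw [PySem.List.pyRange_one_cons hlt, htail]
      simp only [solutionLoopA, hget, subLoop]
      by_cases hc : n < v
      · rw [if_pos hc, if_pos hc]
      · rw [if_neg hc, if_neg hc]
        by_cases hlt' : i + 1 < (e.length : Int)
        · exact ih (i + 1) (n - v) (by omega) (by omega) (by omega)
        · rw [PySem.List.pyRange_one_eq_nil (by omega),
            List.drop_eq_nil_of_le (by omega)]
          rfl
  · rw [PySem.List.pyRange_one_eq_nil (by omega),
      List.drop_eq_nil_of_le (by omega)]
    rfl

-- ===== VERDICT (by name: the statement is the Claim_ definition above) =====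
theorem solution_spec : Claim_equal_solution := by
  intro n k enemy _ hpre
  unfold Spec_solution solution solution_alt
  by_cases hg : (enemy.length : Int) = k
  · rw [if_pos hg, if_pos hg]
  · rw [if_neg hg, if_neg hg]
    set e := PySem.List.sorted enemy (fun x => x) true with he
    simp only [foldl_psums, List.nil_append, scanB_eq_subLoop,
      PySem.List.slice_from e hpre, loopA_eq_subLoop e k n hpre, sub_zero, add_zero]
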